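-- pv_equiv track=rewrite | github.com/t0ddb/alpha-scanner | sequence_overlay.py | compute_streaks_from_history
-- ===== SOURCE A (Python) =====
-- LABELS = ["rs", "ich", "hl", "cmf", "roc", "atr", "dtf"]
--
-- def compute_streaks_from_history(fire_flags_per_day: list[dict[str, int]]) -> dict[str, int]:
--     """Given a chronological list of daily fire flags (one dict per trading day,
--     most recent LAST), compute the current consecutive-firing streak per indicator.
--
--     Each item in fire_flags_per_day should be a dict like:
--       {'rs': 0/1, 'ich': 0/1, 'hl': 0/1, 'cmf': 0/1, 'roc': 0/1, 'atr': 0/1, 'dtf': 0/1}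
--
--     Returns: {'rs': N, 'ich': M, ...} where N is the current streak length
--     (consecutive 1's ending at the LAST entry).
--     """
--     streaks = {lbl: 0 for lbl in LABELS}
--     for lbl in LABELS:
--         # Walk backwards from most recent day; count consecutive 1's
--         count = 0
--         for day in reversed(fire_flags_per_day):
--             if day.get(lbl, 0) == 1:
--                 count += 1
--             else:
--                 break
--         streaks[lbl] = count
--     return streaks
-- ===== SOURCE B (Python) =====
-- LABELS = ["rs", "ich", "hl", "cmf", "roc", "atr", "dtf"]
--
-- def compute_streaks_from_history(fire_flags_per_day: list[dict[str, int]]) -> dict[str, int]: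
--     """Per label: the trailing streak is the distance from the LAST day whose
--     flag is not 1 to the end of the list, so one forward scan recording the
--     index of the last failure gives the streak as a closed form n - 1 - last_fail."""
--     n = len(fire_flags_per_day)
--     result = {}
--     for lbl in LABELS:
--         last_fail = -1
--         for i, day in enumerate(fire_flags_per_day):
--             if day.get(lbl, 0) != 1:
--                 last_fail = i
--         result[lbl] = n - 1 - last_fail
--     return result
-- ===== Notes on version B (the rewrite author's own statement) =====
-- stated objective: alternative
-- what changed: Replaces the per-label backward walk with early break by a per-label forward scan that records the index of the last non-firing day and returns the streak as the closed form n - 1 - last_fail.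
import Mathlib
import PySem

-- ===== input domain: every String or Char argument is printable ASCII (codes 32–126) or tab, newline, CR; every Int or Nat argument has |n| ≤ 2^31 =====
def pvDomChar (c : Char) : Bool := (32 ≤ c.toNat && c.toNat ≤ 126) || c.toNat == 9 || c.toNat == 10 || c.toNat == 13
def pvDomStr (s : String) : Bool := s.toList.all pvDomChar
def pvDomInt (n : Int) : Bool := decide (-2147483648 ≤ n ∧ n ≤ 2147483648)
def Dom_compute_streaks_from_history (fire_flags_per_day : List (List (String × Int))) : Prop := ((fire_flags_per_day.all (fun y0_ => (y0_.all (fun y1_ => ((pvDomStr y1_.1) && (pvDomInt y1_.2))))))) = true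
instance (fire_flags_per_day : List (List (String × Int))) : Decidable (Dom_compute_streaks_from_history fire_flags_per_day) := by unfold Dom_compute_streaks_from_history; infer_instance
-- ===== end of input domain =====

-- B replaces A's per-label backward walk (with early break) by a per-label forward
-- scan recording the index of the last non-firing day; streak = n - 1 - last_fail.

def pvLabels : List String := ["rs", "ich", "hl", "cmf", "roc", "atr", "dtf"]

-- day.get(lbl, 0): first-match lookup in the day's association list
def pvDayGet (day : List (String × Int)) (lbl : String) : Int :=
  PySem.Dict.getD (PySem.Dict.mk day) lbl 0

-- ===== PORT A =====
-- A's inner backward loop with break: count consecutive 1's from the front of the reversed list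
def pvCountBack (lbl : String) : List (List (String × Int)) → Int
  | [] => 0
  | day :: rest => if pvDayGet day lbl == 1 then pvCountBack lbl rest + 1 else 0

def compute_streaks_from_history (fire_flags_per_day : List (List (String × Int))) : List (String × Int) :=
  let streaks := pvLabels.foldl (fun d lbl => PySem.Dict.insert d lbl 0) PySem.Dict.empty
  (pvLabels.foldl (fun d lbl => PySem.Dict.insert d lbl (pvCountBack lbl fire_flags_per_day.reverse)) streaks).items

-- ===== PORT B =====
-- B's inner loop: for i, day in enumerate(...): if day.get(lbl, 0) != 1: last_fail = i
def pvLastFail (lbl : String) (l : List (List (String × Int))) : Int :=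
  (PySem.List.enumerate l).foldl (fun lf p => if pvDayGet p.2 lbl != 1 then p.1 else lf) (-1)

-- result = {} then result[lbl] = … once per (distinct) label, in order: inserting a
-- fresh key at the end of an empty dict is exactly appending, so items is this fold.
def compute_streaks_from_history_alt (fire_flags_per_day : List (List (String × Int))) : List (String × Int) :=
  let n : Int := fire_flags_per_day.length
  pvLabels.foldl (fun result lbl => result ++ [(lbl, n - 1 - pvLastFail lbl fire_flags_per_day)]) []

-- ===== PRECONDITION & SPEC =====
def Spec_compute_streaks_from_history (fire_flags_per_day : List (List (String × Int))) (out : List (String × Int)) : Prop := out = compute_streaks_from_history_alt fire_flags_per_day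
instance (fire_flags_per_day : List (List (String × Int))) (out : List (String × Int)) : Decidable (Spec_compute_streaks_from_history fire_flags_per_day out) := by unfold Spec_compute_streaks_from_history; infer_instance

-- ===== CLAIM (what is proved, stated in full; the proofs are below) =====
def Claim_equal_compute_streaks_from_history : Prop := ∀ (fire_flags_per_day : List (List (String × Int))), Dom_compute_streaks_from_history fire_flags_per_day → Spec_compute_streaks_from_history fire_flags_per_day (compute_streaks_from_history fire_flags_per_day)

-- ===== LEMMAS AND PROOFS =====

theorem pvLastFail_append (lbl : String) (l : List (List (String × Int))) (d : List (String × Int)) :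
    pvLastFail lbl (l ++ [d]) =
      if pvDayGet d lbl != 1 then (l.length : Int) else pvLastFail lbl l := by
  unfold pvLastFail
  rw [PySem.List.enumerate_append]
  simp [PySem.List.enumerate]

theorem pvStreak_eq (lbl : String) (l : List (List (String × Int))) :
    (l.length : Int) - 1 - pvLastFail lbl l = pvCountBack lbl l.reverse := by
  induction l using List.reverseRecOn with
  | nil => simp [pvLastFail, PySem.List.enumerate, pvCountBack]
  | append_singleton l d ih =>
    rw [pvLastFail_append]
    by_cases hd : pvDayGet d lbl = 1 <;>
      simp [hd, pvCountBack, ← ih] <;> push_cast <;> omega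

-- ===== VERDICT (by name: the statement is the Claim_ definition above) =====
theorem compute_streaks_from_history_spec : Claim_equal_compute_streaks_from_history := by
  intro l _
  unfold Spec_compute_streaks_from_history compute_streaks_from_history compute_streaks_from_history_alt
  simp [pvLabels, PySem.Dict.insert, PySem.Dict.empty, PySem.Dict.contains,
    ← pvStreak_eq]
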